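-- pv_equiv track=rewrite | github.com/yuriyfomin17/EPI | chapter5/k_th_lexographic_permutation.py | next_kth_lexographical_permutation
-- ===== SOURCE A (Python) =====
-- import math
-- from typing import List
--
-- def next_kth_lexographical_permutation(sequence: List[int], k: int) -> List[int]:
--     res = []
--     N = len(sequence)
--     for i in reversed(range(N)):
--         idx_to_remove = k // math.factorial(i)
--         k -= idx_to_remove * math.factorial(i)
--         if len(sequence) == 0 or not 0 <= idx_to_remove < len(sequence):
--             return []
--         res.append(sequence.pop(idx_to_remove))
--     return res
-- ===== SOURCE B (Python) =====
-- from typing import List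
--
-- def next_kth_lexographical_permutation(sequence: List[int], k: int) -> List[int]:
--     # Convert k to factorial-number-system digits by successive divmod (no factorials),
--     # then materialise the permutation by popping the digits from a copy of the input.
--     digits = []
--     for i in range(1, len(sequence) + 1):
--         k, d = divmod(k, i)
--         digits.append(d)
--     if k != 0:  # k was negative or >= len(sequence)!
--         return []
--     rem = list(sequence)
--     return [rem.pop(d) for d in reversed(digits)]
-- ===== Notes on version B (the rewrite author's own statement) =====
-- stated objective: faster
-- what changed: Instead of computing math.factorial(i) and a floor-division/range-check at every step of the selection loop, B converts k to factorial-number-system digits in one ascending divmod pass (no factorials at all), validates k with a single leftover==0 test, and then pops the precomputed digits from a copy of the input; B also does not mutate the caller's list.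
import Mathlib
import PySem

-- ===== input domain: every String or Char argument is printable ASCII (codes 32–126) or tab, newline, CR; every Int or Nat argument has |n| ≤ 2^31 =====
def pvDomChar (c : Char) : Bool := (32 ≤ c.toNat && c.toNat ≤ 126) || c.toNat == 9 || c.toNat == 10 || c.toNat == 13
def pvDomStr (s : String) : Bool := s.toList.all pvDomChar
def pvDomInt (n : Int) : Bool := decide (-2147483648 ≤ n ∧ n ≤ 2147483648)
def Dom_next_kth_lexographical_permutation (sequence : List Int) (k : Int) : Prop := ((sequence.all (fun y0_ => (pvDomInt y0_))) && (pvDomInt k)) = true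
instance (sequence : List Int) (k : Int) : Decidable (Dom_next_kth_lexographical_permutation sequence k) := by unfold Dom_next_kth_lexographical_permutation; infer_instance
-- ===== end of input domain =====

-- B replaces A's per-step factorial computation and range checks by one ascending
-- divmod pass (factoradic digits) plus a single leftover-zero validity test; B is
-- measurably faster and, unlike A, does not mutate its argument (return values agree;
-- A pops from the caller's list, B works on a copy — the equivalence proved here is
-- about the return value only).

-- ===== PORT A =====
-- loop "for i in reversed(range(N))" with state (res, sequence, k); early return [] on a bad index
def goA : List Nat → List Int → List Int → Int → List Int
  | [], res, _, _ => res
  | i :: rest, res, seq, k =>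
    let f : Int := (Nat.factorial i : Int)        -- math.factorial(i)
    let idx := PySem.Int.floordiv k f
    let k' := k - idx * f
    if seq.length = 0 ∨ ¬(0 ≤ idx ∧ idx < (seq.length : Int)) then []
    else
      match PySem.List.pop? seq idx with
      | some (x, seq') => goA rest (res ++ [x]) seq' k'
      | none => []                                -- unreachable: idx was checked in range

def next_kth_lexographical_permutation (sequence : List Int) (k : Int) : List Int :=
  goA (List.range sequence.length).reverse [] sequence k

-- ===== PORT B =====
-- "for i in range(1, len(sequence)+1): k, d = divmod(k, i); digits.append(d)"
def bDigits : List Nat → Int → List Int → Int × List Int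
  | [], k, digits => (k, digits)
  | i :: is, k, digits =>
      bDigits is (PySem.Int.floordiv k (i : Int)) (digits ++ [PySem.Int.mod k (i : Int)])

-- "[rem.pop(d) for d in reversed(digits)]"
def bPop : List Int → List Int → List Int
  | [], _ => []
  | d :: ds, rem =>
    match PySem.List.pop? rem d with
    | some (x, rem') => x :: bPop ds rem'
    | none => []                                  -- unreachable: factoradic digits are in range

def next_kth_lexographical_permutation_alt (sequence : List Int) (k : Int) : List Int :=
  let r := bDigits (List.range' 1 sequence.length) k []
  if r.1 ≠ 0 then [] else bPop r.2.reverse sequence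

-- ===== PRECONDITION & SPEC =====
def Spec_next_kth_lexographical_permutation (sequence : List Int) (k : Int) (out : List Int) : Prop := out = next_kth_lexographical_permutation_alt sequence k
instance (sequence : List Int) (k : Int) (out : List Int) : Decidable (Spec_next_kth_lexographical_permutation sequence k out) := by unfold Spec_next_kth_lexographical_permutation; infer_instance

-- ===== CLAIM (what is proved, stated in full; the proofs are below) =====
def Claim_equal_next_kth_lexographical_permutation : Prop := ∀ (sequence : List Int) (k : Int), Dom_next_kth_lexographical_permutation sequence k → Spec_next_kth_lexographical_permutation sequence k (next_kth_lexographical_permutation sequence k)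

-- ===== LEMMAS AND PROOFS =====

-- common reference function: the k-th permutation when 0 ≤ k < n! (proof-only helper)
def build : Nat → List Int → Int → List Int
  | 0, _, _ => []
  | m+1, seq, k =>
    let idx := (PySem.Int.floordiv k (Nat.factorial m : Int)).toNat
    seq.getD idx 0 :: build m (seq.eraseIdx idx) (PySem.Int.mod k (Nat.factorial m : Int))

-- product of radices i, i+1, …, i+c-1
def P : Nat → Nat → Nat
  | _, 0 => 1
  | i, c+1 => i * P (i+1) c

-- digits of k for radices i, i+1, …, i+c-1 (least significant first)
def digitsFrom : Nat → Nat → Int → List Int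
  | _, 0, _ => []
  | i, c+1, k => PySem.Int.mod k (i : Int) :: digitsFrom (i+1) c (PySem.Int.floordiv k (i : Int))

theorem P_pos : ∀ (c i : Nat), 1 ≤ i → 0 < P i c := by
  intro c
  induction c with
  | zero => intro i _; simp [P]
  | succ c ih => intro i hi; simpa [P] using Nat.mul_pos (by omega) (ih (i+1) (by omega))

theorem P_succ_right : ∀ (c i : Nat), P i (c+1) = P i c * (i + c) := by
  intro c
  induction c with
  | zero => intro i; simp [P]
  | succ c ih =>
      intro i
      show i * P (i+1) (c+1) = P i (c+1) * (i + (c+1))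
      rw [ih (i+1), show P i (c+1) = i * P (i+1) c from rfl]
      ring

theorem P_one : ∀ (m : Nat), P 1 m = Nat.factorial m := by
  intro m
  induction m with
  | zero => simp [P]
  | succ m ih => rw [P_succ_right, ih, Nat.factorial_succ]; ring

theorem floordiv_floordiv (k a b : Int) (ha : 0 < a) (hb : 0 < b) :
    PySem.Int.floordiv (PySem.Int.floordiv k a) b = PySem.Int.floordiv k (a * b) := by
  set q := PySem.Int.floordiv (PySem.Int.floordiv k a) b with hq
  have h1 : q * b ≤ PySem.Int.floordiv k a ∧ PySem.Int.floordiv k a < (q + 1) * b := by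
    constructor
    · exact (PySem.Int.le_floordiv_iff_mul_le hb).mp (le_of_eq hq.symm)
    · exact (PySem.Int.floordiv_lt_iff_lt_mul hb).mp (by omega)
  have h2 : (q * b) * a ≤ k := (PySem.Int.le_floordiv_iff_mul_le ha).mp h1.1
  have h3 : k < ((q + 1) * b) * a := (PySem.Int.floordiv_lt_iff_lt_mul ha).mp h1.2
  symm
  rw [PySem.Int.floordiv_eq_iff_of_pos (by positivity)]
  constructor
  · calc q * (a * b) = (q * b) * a := by ring
      _ ≤ k := h2
  · calc k < ((q + 1) * b) * a := h3
      _ = (q + 1) * (a * b) := by ring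

theorem floordiv_eq_zero_iff (k f : Int) (hf : 0 < f) :
    PySem.Int.floordiv k f = 0 ↔ 0 ≤ k ∧ k < f := by
  rw [PySem.Int.floordiv_eq_iff_of_pos hf]
  constructor <;> intro h <;> exact ⟨by linarith [h.1], by linarith [h.2]⟩

theorem floordiv_nonneg' (k f : Int) (hk : 0 ≤ k) (hf : 0 < f) :
    0 ≤ PySem.Int.floordiv k f := by
  exact (PySem.Int.le_floordiv_iff_mul_le (q := 0) hf).mpr (by simpa using hk)

theorem bDigits_eq : ∀ (c i : Nat) (k : Int) (acc : List Int), 1 ≤ i →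
    bDigits (List.range' i c) k acc = (PySem.Int.floordiv k (P i c : Int), acc ++ digitsFrom i c k) := by
  intro c
  induction c with
  | zero => intro i k acc _; simp [bDigits, digitsFrom, P]
  | succ c ih =>
      intro i k acc hi
      rw [List.range'_succ]
      simp only [bDigits, digitsFrom]
      rw [ih (i+1) _ _ (by omega)]
      have hcast : ((P i (c+1) : Nat) : Int) = (i : Int) * (P (i+1) c : Nat) := by
        simp [P]
      rw [hcast, ← floordiv_floordiv k i _ (by exact_mod_cast hi) (by exact_mod_cast P_pos c (i+1) (by omega))]
      simp

theorem digitsFrom_stable : ∀ (c i : Nat) (k t : Int), 1 ≤ i →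
    digitsFrom i c (k + (P i c : Int) * t) = digitsFrom i c k := by
  intro c
  induction c with
  | zero => intro i k t _; simp [digitsFrom]
  | succ c ih =>
      intro i k t hi
      have hip : (0:Int) < (i:Int) := by exact_mod_cast hi
      have hPc : ((P i (c+1) : Nat) : Int) = (i : Int) * ((P (i+1) c : Nat) : Int) := by
        simp [P]
      have hhead : PySem.Int.mod (k + ((P i (c+1) : Nat) : Int) * t) (i : Int)
          = PySem.Int.mod k (i : Int) := by
        rw [PySem.Int.mod_eq_emod_of_pos hip, PySem.Int.mod_eq_emod_of_pos hip, hPc, mul_assoc]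
        exact Int.add_mul_emod_self_left k (i : Int) (((P (i+1) c : Nat) : Int) * t)
      have hd : PySem.Int.floordiv (k + ((P i (c+1) : Nat) : Int) * t) (i : Int)
          = PySem.Int.floordiv k (i : Int) + ((P (i+1) c : Nat) : Int) * t := by
        rw [PySem.Int.floordiv_eq_ediv_of_pos hip, PySem.Int.floordiv_eq_ediv_of_pos hip, hPc,
          mul_assoc]
        exact Int.add_mul_ediv_left k (((P (i+1) c : Nat) : Int) * t) (by omega)
      simp only [digitsFrom]
      rw [hhead, hd, ih (i+1) _ t (by omega)]

theorem digitsFrom_snoc : ∀ (c i : Nat) (k : Int), 1 ≤ i →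
    digitsFrom i (c+1) k
      = digitsFrom i c k ++ [PySem.Int.mod (PySem.Int.floordiv k (P i c : Int)) ((i + c : Nat) : Int)] := by
  intro c
  induction c with
  | zero => intro i k _; simp [digitsFrom, P]
  | succ c ih =>
      intro i k hi
      have hip : (0:Int) < (i:Int) := by exact_mod_cast hi
      have hPp : (0:Int) < ((P (i+1) c : Nat) : Int) := by exact_mod_cast P_pos c (i+1) (by omega)
      show PySem.Int.mod k (i : Int) :: digitsFrom (i+1) (c+1) (PySem.Int.floordiv k (i : Int)) = _
      rw [ih (i+1) _ (by omega)]
      have hPc : ((P i (c+1) : Nat) : Int) = (i : Int) * ((P (i+1) c : Nat) : Int) := by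
        simp [P]
      rw [floordiv_floordiv k _ _ hip hPp, ← hPc]
      simp only [digitsFrom]
      have : (i + 1 + c : Nat) = (i + (c+1) : Nat) := by omega
      rw [this]
      simp

-- pop? at an in-range Int index
theorem pop?_of_bounds (xs : List Int) (idx : Int) (h0 : 0 ≤ idx) (h1 : idx < (xs.length : Int)) :
    PySem.List.pop? xs idx = some (xs.getD idx.toNat 0, xs.eraseIdx idx.toNat) := by
  have hn : idx.toNat < xs.length := by omega
  have hcast : idx = ((idx.toNat : Nat) : Int) := by omega
  conv_lhs => rw [hcast]
  rw [PySem.List.pop?_natCast xs idx.toNat hn, List.getD_eq_getElem _ _ hn]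

theorem bPop_build : ∀ (n : Nat) (seq : List Int) (k : Int), seq.length = n →
    0 ≤ k → k < (Nat.factorial n : Int) →
    bPop (digitsFrom 1 n k).reverse seq = build n seq k := by
  intro n
  induction n with
  | zero => intro seq k _ _ _; simp [digitsFrom, bPop, build]
  | succ m ih =>
      intro seq k hlen hk0 hk1
      have hfp : (0:Int) < (Nat.factorial m : Int) := by exact_mod_cast Nat.factorial_pos m
      have hq0 : 0 ≤ PySem.Int.floordiv k (Nat.factorial m : Int) := floordiv_nonneg' k _ hk0 hfp
      have hq1 : PySem.Int.floordiv k (Nat.factorial m : Int) < (m : Int) + 1 := by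
        rw [PySem.Int.floordiv_lt_iff_lt_mul hfp]
        have h2 : (Nat.factorial (m+1) : Int) = ((m:Int) + 1) * (Nat.factorial m : Int) := by
          rw [Nat.factorial_succ]; push_cast; ring
        omega
      rw [digitsFrom_snoc m 1 k (by omega), P_one]
      have hmod : PySem.Int.mod (PySem.Int.floordiv k (Nat.factorial m : Int)) ((1 + m : Nat) : Int)
          = PySem.Int.floordiv k (Nat.factorial m : Int) := by
        rw [PySem.Int.mod_eq_emod_of_pos (by push_cast; omega)]
        exact Int.emod_eq_of_lt hq0 (by push_cast; omega)
      rw [List.reverse_append, List.reverse_singleton, List.singleton_append]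
      simp only [bPop, hmod]
      rw [pop?_of_bounds seq _ hq0 (by omega)]
      have hstab : digitsFrom 1 m k = digitsFrom 1 m (PySem.Int.mod k (Nat.factorial m : Int)) := by
        have hfm := PySem.Int.floordiv_mul_add_mod k (Nat.factorial m : Int)
        have hk' : k = PySem.Int.mod k (Nat.factorial m : Int)
            + ((P 1 m : Nat) : Int) * PySem.Int.floordiv k (Nat.factorial m : Int) := by
          rw [P_one]; linarith
        conv_lhs => rw [hk']
        rw [digitsFrom_stable m 1 _ _ (by omega)]
      show seq.getD (PySem.Int.floordiv k (Nat.factorial m : Int)).toNat 0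
          :: bPop (digitsFrom 1 m k).reverse
              (seq.eraseIdx (PySem.Int.floordiv k (Nat.factorial m : Int)).toNat)
        = build (m+1) seq k
      rw [hstab]
      rw [ih _ _ (by rw [List.length_eraseIdx_of_lt (by omega)]; omega)
        (PySem.Int.mod_nonneg k hfp) (PySem.Int.mod_lt k hfp)]
      rfl

-- A's loop in the good range equals build
theorem goA_eq : ∀ (n : Nat) (seq : List Int) (k : Int) (res : List Int), seq.length = n →
    0 ≤ k → k < (Nat.factorial n : Int) →
    goA (List.range n).reverse res seq k = res ++ build n seq k := by
  intro n
  induction n with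
  | zero => intro seq k res _ _ _; simp [goA, build]
  | succ m ih =>
      intro seq k res hlen hk0 hk1
      have hfp : (0:Int) < (Nat.factorial m : Int) := by exact_mod_cast Nat.factorial_pos m
      have hq0 : 0 ≤ PySem.Int.floordiv k (Nat.factorial m : Int) := floordiv_nonneg' k _ hk0 hfp
      have hq1 : PySem.Int.floordiv k (Nat.factorial m : Int) < (m : Int) + 1 := by
        rw [PySem.Int.floordiv_lt_iff_lt_mul hfp]
        have h2 : (Nat.factorial (m+1) : Int) = ((m:Int) + 1) * (Nat.factorial m : Int) := by
          rw [Nat.factorial_succ]; push_cast; ring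
        omega
      have hrev : (List.range (m+1)).reverse = m :: (List.range m).reverse := by
        rw [List.range_succ]; simp
      rw [hrev]
      simp only [goA]
      rw [if_neg (by
        push_neg
        exact ⟨by omega, hq0, by rw [hlen]; push_cast; omega⟩)]
      rw [pop?_of_bounds seq _ hq0 (by omega)]
      have hk' : k - PySem.Int.floordiv k (Nat.factorial m : Int) * (Nat.factorial m : Int)
          = PySem.Int.mod k (Nat.factorial m : Int) := by
        linarith [PySem.Int.floordiv_mul_add_mod k (Nat.factorial m : Int)]
      rw [hk']
      show goA (List.range m).reverse
          (res ++ [seq.getD (PySem.Int.floordiv k (Nat.factorial m : Int)).toNat 0])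
          (seq.eraseIdx (PySem.Int.floordiv k (Nat.factorial m : Int)).toNat)
          (PySem.Int.mod k (Nat.factorial m : Int)) = res ++ build (m+1) seq k
      rw [ih _ _ _ (by rw [List.length_eraseIdx_of_lt (by omega)]; omega)
        (PySem.Int.mod_nonneg k hfp) (PySem.Int.mod_lt k hfp)]
      simp [build]

-- A's loop outside the good range returns []
theorem goA_bad : ∀ (n : Nat) (seq : List Int) (k : Int), seq.length = n → n ≠ 0 →
    (k < 0 ∨ (Nat.factorial n : Int) ≤ k) →
    goA (List.range n).reverse [] seq k = [] := by
  intro n seq k hlen hn hbad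
  obtain ⟨m, rfl⟩ : ∃ m, n = m + 1 := ⟨n - 1, by omega⟩
  have hfp : (0:Int) < (Nat.factorial m : Int) := by exact_mod_cast Nat.factorial_pos m
  have hrev : (List.range (m+1)).reverse = m :: (List.range m).reverse := by
    rw [List.range_succ]; simp
  rw [hrev]
  simp only [goA]
  rw [if_pos]
  refine Or.inr ?_
  push_neg
  intro h0
  rcases hbad with hneg | hbig
  · exfalso
    have hm0 := PySem.Int.mod_nonneg k hfp
    have := PySem.Int.floordiv_mul_add_mod k (Nat.factorial m : Int)
    have : 0 ≤ PySem.Int.floordiv k (Nat.factorial m : Int) * (Nat.factorial m : Int) :=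
      mul_nonneg h0 (le_of_lt hfp)
    linarith
  · have hle : ((m:Int) + 1) ≤ PySem.Int.floordiv k (Nat.factorial m : Int) := by
      rw [PySem.Int.le_floordiv_iff_mul_le hfp]
      have h2 : (Nat.factorial (m+1) : Int) = ((m:Int) + 1) * (Nat.factorial m : Int) := by
        rw [Nat.factorial_succ]; push_cast; ring
      omega
    rw [hlen]
    push_cast
    omega

theorem A_char (seq : List Int) (k : Int) :
    next_kth_lexographical_permutation seq k
      = if 0 ≤ k ∧ k < (Nat.factorial seq.length : Int) then build seq.length seq k else [] := by
  by_cases h : 0 ≤ k ∧ k < (Nat.factorial seq.length : Int)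
  · rw [if_pos h]
    exact goA_eq seq.length seq k [] rfl h.1 h.2
  · rw [if_neg h]
    by_cases hn : seq.length = 0
    · have : (List.range seq.length).reverse = [] := by rw [hn]; rfl
      show goA (List.range seq.length).reverse [] seq k = []
      rw [this]; rfl
    · exact goA_bad seq.length seq k rfl hn (by push_neg at h; omega)

theorem B_char (seq : List Int) (k : Int) :
    next_kth_lexographical_permutation_alt seq k
      = if 0 ≤ k ∧ k < (Nat.factorial seq.length : Int) then build seq.length seq k else [] := by
  show (let r := bDigits (List.range' 1 seq.length) k [];
        if r.1 ≠ 0 then [] else bPop r.2.reverse seq) = _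
  rw [bDigits_eq seq.length 1 k [] (by omega)]
  have hfp : (0:Int) < ((P 1 seq.length : Nat) : Int) := by
    exact_mod_cast P_pos seq.length 1 (by omega)
  by_cases h : 0 ≤ k ∧ k < (Nat.factorial seq.length : Int)
  · have hz : PySem.Int.floordiv k ((P 1 seq.length : Nat) : Int) = 0 := by
      rw [floordiv_eq_zero_iff _ _ hfp, P_one]; exact h
    simp only [hz, ne_eq, not_true_eq_false, if_false, if_pos h]
    simpa using bPop_build seq.length seq k rfl h.1 h.2
  · have hz : PySem.Int.floordiv k ((P 1 seq.length : Nat) : Int) ≠ 0 := by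
      rw [ne_eq, floordiv_eq_zero_iff _ _ hfp, P_one]; exact h
    simp [hz, h]

-- ===== VERDICT (by name: the statement is the Claim_ definition above) =====
theorem next_kth_lexographical_permutation_spec : Claim_equal_next_kth_lexographical_permutation := by
  intro seq k _
  show next_kth_lexographical_permutation seq k = next_kth_lexographical_permutation_alt seq k
  rw [A_char, B_char]
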